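-- pv_equiv track=rewrite | github.com/Xinglab/ProteoSeq | scripts/plot_gene.py | adjust_pos
-- ===== SOURCE A (Python) =====
-- def adjust_pos(exon_dict, min_pos):
--     final_pos_dict = {}
--     corrected_exon_dict = {}
--     corrected_intron_dict = {}
--     for tx_id, exon_coord_list in exon_dict.items():
--         if len(exon_coord_list) == 0:
--             corrected_exon_dict[tx_id] = []
--             corrected_intron_dict[tx_id] = []
--             final_pos_dict[tx_id] = 0
--             continue
--         exon_n = len(exon_coord_list)
--         ### adjust initial current_pos
--         initial_pos = exon_coord_list[0][0] - min_pos
--         current_pos = initial_pos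
--         for i in range(exon_n):
--             exon_coord = exon_coord_list[i]
--             exon_len = exon_coord[1] - exon_coord[0] + 1
--             current_exon_pos = (current_pos, current_pos+exon_len)
--             corrected_exon_dict.setdefault(tx_id, []).append(current_exon_pos)
--             current_pos += exon_len
--             if (exon_n >= 2) and ( i < (exon_n-1)):
--                 exon_coord_next = exon_coord_list[i+1]
--                 intron_len = exon_coord_next[0] - exon_coord[1] - 1
--                 current_intron_pos = (current_pos, current_pos+intron_len)
--                 corrected_intron_dict.setdefault(tx_id, []).append(current_intron_pos)
--                 current_pos = current_pos + intron_len
--         final_pos_dict[tx_id] = current_pos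
--     return final_pos_dict,corrected_exon_dict,corrected_intron_dict
-- ===== SOURCE B (Python) =====
-- def adjust_pos(exon_dict, min_pos):
--     # Closed form: the running position telescopes, so every corrected
--     # coordinate is just the genomic coordinate shifted by min_pos.
--     final_pos_dict = {}
--     corrected_exon_dict = {}
--     corrected_intron_dict = {}
--     for tx_id, exons in exon_dict.items():
--         if not exons:
--             final_pos_dict[tx_id] = 0
--             corrected_exon_dict[tx_id] = []
--             corrected_intron_dict[tx_id] = []
--             continue
--         corrected_exon_dict[tx_id] = [(a - min_pos, b + 1 - min_pos) for a, b in exons]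
--         if len(exons) >= 2:
--             corrected_intron_dict[tx_id] = [(b + 1 - min_pos, a2 - min_pos)
--                                             for (_, b), (a2, _) in zip(exons, exons[1:])]
--         final_pos_dict[tx_id] = exons[-1][1] + 1 - min_pos
--     return final_pos_dict, corrected_exon_dict, corrected_intron_dict
-- ===== Notes on version B (the rewrite author's own statement) =====
-- stated objective: simpler
-- what changed: Replaces the running-position accumulator loop (current_pos threaded through exons and introns with setdefault/append) by a closed form: the position telescopes, so each corrected exon is (a-min_pos, b+1-min_pos), each intron is read off consecutive exon pairs via zip, and final_pos is last_exon_end+1-min_pos.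
import Mathlib
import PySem

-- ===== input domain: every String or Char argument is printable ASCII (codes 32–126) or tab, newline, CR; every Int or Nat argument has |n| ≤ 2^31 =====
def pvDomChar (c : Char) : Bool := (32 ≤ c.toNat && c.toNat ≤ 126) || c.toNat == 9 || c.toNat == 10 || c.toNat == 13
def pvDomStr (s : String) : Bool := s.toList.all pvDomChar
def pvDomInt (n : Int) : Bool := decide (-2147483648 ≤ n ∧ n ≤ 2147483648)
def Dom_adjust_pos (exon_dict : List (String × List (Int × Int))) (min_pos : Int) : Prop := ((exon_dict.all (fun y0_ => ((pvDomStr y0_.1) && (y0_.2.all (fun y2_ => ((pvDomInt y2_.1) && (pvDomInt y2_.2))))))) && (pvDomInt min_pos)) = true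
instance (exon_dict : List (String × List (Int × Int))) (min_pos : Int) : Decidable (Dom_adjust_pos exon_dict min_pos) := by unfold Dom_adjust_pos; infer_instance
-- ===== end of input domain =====

-- B replaces A's running-position accumulator by the telescoped closed form
-- (each corrected coordinate is the genomic coordinate shifted by min_pos);
-- equivalence of the RETURN values is proved for dicts with distinct keys.

-- ===== PORT A =====
-- inner `for i in range(exon_n)` loop of A, as structural recursion over the
-- exon list (the `i < exon_n-1` test becomes "the tail is nonempty"); it
-- threads the two dicts and current_pos exactly as the Python loop does.
def pvLoopA (tx_id : String) : List (Int × Int) → PySem.Dict String (List (Int × Int)) → PySem.Dict String (List (Int × Int)) → Int → PySem.Dict String (List (Int × Int)) × PySem.Dict String (List (Int × Int)) × Int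
  | [], ed, idd, cur => (ed, idd, cur)
  | exon_coord :: rest, ed, idd, cur =>
    let exon_len := exon_coord.2 - exon_coord.1 + 1
    let ed' := ed.modify tx_id [] (· ++ [(cur, cur + exon_len)])   -- setdefault(tx_id, []).append
    let cur' := cur + exon_len
    match rest with
    | [] => (ed', idd, cur')
    | next :: _ =>
      let intron_len := next.1 - exon_coord.2 - 1
      let idd' := idd.modify tx_id [] (· ++ [(cur', cur' + intron_len)])
      pvLoopA tx_id rest ed' idd' (cur' + intron_len)

def adjust_pos (exon_dict : List (String × List (Int × Int))) (min_pos : Int) : (List (String × Int)) × (List (String × List (Int × Int))) × (List (String × List (Int × Int))) :=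
  let st := exon_dict.foldl
    (fun (st : PySem.Dict String Int × PySem.Dict String (List (Int × Int)) × PySem.Dict String (List (Int × Int))) kv =>
      let fd := st.1
      let ed := st.2.1
      let idd := st.2.2
      match kv.2 with
      | [] => (fd.insert kv.1 0, ed.insert kv.1 [], idd.insert kv.1 [])
      | e0 :: rest =>
        let initial_pos := e0.1 - min_pos           -- exon_coord_list[0][0] - min_pos
        let r := pvLoopA kv.1 (e0 :: rest) ed idd initial_pos
        (fd.insert kv.1 r.2.2, r.1, r.2.1))
    (PySem.Dict.empty, PySem.Dict.empty, PySem.Dict.empty)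
  (st.1.items, st.2.1.items, st.2.2.items)

-- ===== PORT B =====
def adjust_pos_alt (exon_dict : List (String × List (Int × Int))) (min_pos : Int) : (List (String × Int)) × (List (String × List (Int × Int))) × (List (String × List (Int × Int))) :=
  let st := exon_dict.foldl
    (fun (st : PySem.Dict String Int × PySem.Dict String (List (Int × Int)) × PySem.Dict String (List (Int × Int))) kv =>
      let fd := st.1
      let ed := st.2.1
      let idd := st.2.2
      match kv.2 with
      | [] => (fd.insert kv.1 0, ed.insert kv.1 [], idd.insert kv.1 [])
      | _ :: _ =>
        let ed' := ed.insert kv.1 (kv.2.map (fun e => (e.1 - min_pos, e.2 + 1 - min_pos)))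
        let idd' := if 2 ≤ kv.2.length then
            idd.insert kv.1 ((kv.2.zip kv.2.tail).map (fun p => (p.1.2 + 1 - min_pos, p.2.1 - min_pos)))
          else idd
        let fd' := fd.insert kv.1 ((PySem.List.pyGetD kv.2 (-1) (0, 0)).2 + 1 - min_pos)
        (fd', ed', idd'))
    (PySem.Dict.empty, PySem.Dict.empty, PySem.Dict.empty)
  (st.1.items, st.2.1.items, st.2.2.items)

-- ===== PRECONDITION & SPEC =====
-- Pre_ excludes association lists with duplicate tx_ids: the Python argument is a
-- dict, which cannot have duplicate keys, so such lists do not represent any input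
-- of the Python programs (A's setdefault would merge them, B would overwrite).
def Pre_adjust_pos (exon_dict : List (String × List (Int × Int))) (min_pos : Int) : Prop :=
  (exon_dict.map Prod.fst).Nodup
instance (exon_dict : List (String × List (Int × Int))) (min_pos : Int) : Decidable (Pre_adjust_pos exon_dict min_pos) := by unfold Pre_adjust_pos; infer_instance

def pvWitness_adjust_pos : (List (String × List (Int × Int))) × Int :=
  ([("tx1", [(3, 5), (9, 12)]), ("tx2", []), ("tx3", [(4, 4)])], 2)

def Spec_adjust_pos (exon_dict : List (String × List (Int × Int))) (min_pos : Int) (out : (List (String × Int)) × (List (String × List (Int × Int))) × (List (String × List (Int × Int)))) : Prop := out = adjust_pos_alt exon_dict min_pos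
instance (exon_dict : List (String × List (Int × Int))) (min_pos : Int) (out : (List (String × Int)) × (List (String × List (Int × Int))) × (List (String × List (Int × Int)))) : Decidable (Spec_adjust_pos exon_dict min_pos out) := by unfold Spec_adjust_pos; infer_instance

-- ===== CLAIM (what is proved, stated in full; the proofs are below) =====
def Claim_equal_adjust_pos : Prop := ∀ (exon_dict : List (String × List (Int × Int))) (min_pos : Int), Dom_adjust_pos exon_dict min_pos → Pre_adjust_pos exon_dict min_pos → Spec_adjust_pos exon_dict min_pos (adjust_pos exon_dict min_pos)

-- ===== LEMMAS AND PROOFS =====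

theorem pv_ins_ins {ν : Type} (d : PySem.Dict String ν) (k : String) (v w : ν) :
    (d.insert k v).insert k w = d.insert k w := by
  apply PySem.Dict.ext
  by_cases h : d.contains k = true
  · rw [PySem.Dict.items_insert_of_contains _ w
         (by simp),
        PySem.Dict.items_insert_of_contains _ v h,
        PySem.Dict.items_insert_of_contains _ w h]
    rw [List.map_map]
    apply List.map_congr_left
    intro p _
    by_cases hp : p.1 = k <;> simp [hp]
  · simp only [Bool.not_eq_true] at h
    rw [PySem.Dict.items_insert_of_contains _ w
          (by simp),
        PySem.Dict.items_insert_of_not_contains _ v h,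
        PySem.Dict.items_insert_of_not_contains _ w h]
    rw [List.map_append]
    have hne : ∀ p ∈ d.items, p.1 ≠ k := by
      intro p hp hpk
      have hm := PySem.Dict.mem_keys_of_mem_items d hp
      rw [hpk, ← PySem.Dict.contains_iff_mem_keys] at hm
      simp [hm] at h
    have hmap : d.items.map (fun p => if p.1 = k then (k, w) else p) = d.items := by
      rw [show d.items = d.items.map id by simp, List.map_map]
      apply List.map_congr_left
      intro p hp
      simp [hne p hp]
    simp [hmap]

theorem pv_modify_app {ν : Type} (d : PySem.Dict String (List ν)) (k : String) (xs ys : List ν) :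
    (d.modify k [] (· ++ xs)).modify k [] (· ++ ys) = d.modify k [] (· ++ (xs ++ ys)) := by
  simp [PySem.Dict.modify, PySem.Dict.getD_insert_self, pv_ins_ins, List.append_assoc]

theorem pv_modify_fresh {ν : Type} (d : PySem.Dict String (List ν)) (k : String) (xs : List ν)
    (h : d.contains k = false) : d.modify k [] (· ++ xs) = d.insert k xs := by
  simp [PySem.Dict.modify, PySem.Dict.getD_of_not_contains _ _ h]

theorem pv_last_one {α : Type} (x : α) (d : α) : PySem.List.pyGetD [x] (-1) d = x := by
  rw [PySem.List.pyGetD_neg_one [x] d (by simp)]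
  simp

theorem pv_last_cons {α : Type} (x y : α) (l : List α) (d : α) :
    PySem.List.pyGetD (x :: y :: l) (-1) d = PySem.List.pyGetD (y :: l) (-1) d := by
  rw [PySem.List.pyGetD_neg_one _ d (by simp), PySem.List.pyGetD_neg_one _ d (by simp)]
  exact List.getLast_cons _

-- closed form of A's inner loop, under the telescoping invariant cur = e.1 - m
theorem pvLoopA_closed (tx : String) (m : Int) :
    ∀ (l : List (Int × Int)) (e : Int × Int)
      (ed idd : PySem.Dict String (List (Int × Int))),
      pvLoopA tx (e :: l) ed idd (e.1 - m) =
        (ed.modify tx [] (· ++ ((e :: l).map (fun x => (x.1 - m, x.2 + 1 - m)))),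
         (match l with
          | [] => idd
          | _ :: _ => idd.modify tx []
              (· ++ (((e :: l).zip l).map (fun p => (p.1.2 + 1 - m, p.2.1 - m))))),
         (PySem.List.pyGetD (e :: l) (-1) (0, 0)).2 + 1 - m) := by
  intro l
  induction l with
  | nil =>
    intro e ed idd
    have h1 : e.1 - m + (e.2 - e.1 + 1) = e.2 + 1 - m := by ring
    show (ed.modify tx [] (· ++ [(e.1 - m, e.1 - m + (e.2 - e.1 + 1))]), idd,
      e.1 - m + (e.2 - e.1 + 1)) = _
    rw [h1, pv_last_one]
    simp
  | cons e' l' ih =>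
    intro e ed idd
    have h2 : e.1 - m + (e.2 - e.1 + 1) + (e'.1 - e.2 - 1) = e'.1 - m := by ring
    have h1 : e.1 - m + (e.2 - e.1 + 1) = e.2 + 1 - m := by ring
    show pvLoopA tx (e' :: l')
        (ed.modify tx [] (· ++ [(e.1 - m, e.1 - m + (e.2 - e.1 + 1))]))
        (idd.modify tx [] (· ++ [(e.1 - m + (e.2 - e.1 + 1),
            e.1 - m + (e.2 - e.1 + 1) + (e'.1 - e.2 - 1))]))
        (e.1 - m + (e.2 - e.1 + 1) + (e'.1 - e.2 - 1)) = _
    rw [h2, h1]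
    rw [ih e' _ _]
    cases l' with
    | nil => simp [pv_modify_app, pv_last_cons]
    | cons a t => simp [pv_modify_app, pv_last_cons]

-- the two outer folds agree entry by entry, as long as every key is fresh
theorem pvFold_eq (min_pos : Int) :
    ∀ (L : List (String × List (Int × Int)))
      (fd : PySem.Dict String Int) (ed idd : PySem.Dict String (List (Int × Int))),
      (L.map Prod.fst).Nodup →
      (∀ kv ∈ L, fd.contains kv.1 = false ∧ ed.contains kv.1 = false ∧ idd.contains kv.1 = false) →
      L.foldl
        (fun (st : PySem.Dict String Int × PySem.Dict String (List (Int × Int)) × PySem.Dict String (List (Int × Int))) kv =>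
          match kv.2 with
          | [] => (st.1.insert kv.1 0, st.2.1.insert kv.1 [], st.2.2.insert kv.1 [])
          | e0 :: rest =>
            let r := pvLoopA kv.1 (e0 :: rest) st.2.1 st.2.2 (e0.1 - min_pos)
            (st.1.insert kv.1 r.2.2, r.1, r.2.1)) (fd, ed, idd) =
      L.foldl
        (fun (st : PySem.Dict String Int × PySem.Dict String (List (Int × Int)) × PySem.Dict String (List (Int × Int))) kv =>
          match kv.2 with
          | [] => (st.1.insert kv.1 0, st.2.1.insert kv.1 [], st.2.2.insert kv.1 [])
          | _ :: _ =>
            (st.1.insert kv.1 ((PySem.List.pyGetD kv.2 (-1) (0, 0)).2 + 1 - min_pos),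
             st.2.1.insert kv.1 (kv.2.map (fun e => (e.1 - min_pos, e.2 + 1 - min_pos))),
             if 2 ≤ kv.2.length then
               st.2.2.insert kv.1 ((kv.2.zip kv.2.tail).map (fun p => (p.1.2 + 1 - min_pos, p.2.1 - min_pos)))
             else st.2.2)) (fd, ed, idd) := by
  intro L
  induction L with
  | nil => intro fd ed idd _ _; rfl
  | cons kv L ih =>
    intro fd ed idd hnd hfresh
    obtain ⟨hf, he, hi⟩ := hfresh kv (by simp)
    have hnotmem : kv.1 ∉ L.map Prod.fst := by
      simpa using (List.nodup_cons.mp hnd).1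
    have hnd' : (L.map Prod.fst).Nodup := (List.nodup_cons.mp hnd).2
    have hne : ∀ kv' ∈ L, kv'.1 ≠ kv.1 := by
      intro kv' hmem heq
      exact hnotmem (heq ▸ List.mem_map_of_mem hmem)
    simp only [List.foldl_cons]
    cases hkv : kv.2 with
    | nil =>
      rw [ih _ _ _ hnd' ?_]
      intro kv' hmem
      obtain ⟨h1, h2, h3⟩ := hfresh kv' (by simp [hmem])
      simp [PySem.Dict.contains_insert, h1, h2, h3, hne kv' hmem]
    | cons e0 rest =>
      dsimp only
      rw [pvLoopA_closed kv.1 min_pos rest e0 _ _]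
      cases rest with
      | nil =>
        rw [pv_modify_fresh _ _ _ he]
        rw [ih _ _ _ hnd' ?_]
        · simp
        · intro kv' hmem
          obtain ⟨h1, h2, h3⟩ := hfresh kv' (by simp [hmem])
          simp [PySem.Dict.contains_insert, h1, h2, h3, hne kv' hmem]
      | cons e1 rest' =>
        rw [pv_modify_fresh _ _ _ he, pv_modify_fresh _ _ _ hi]
        rw [ih _ _ _ hnd' ?_]
        · simp
        · intro kv' hmem
          obtain ⟨h1, h2, h3⟩ := hfresh kv' (by simp [hmem])
          simp [PySem.Dict.contains_insert, h1, h2, h3, hne kv' hmem]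

-- ===== VERDICT (by name: the statement is the Claim_ definition above) =====
theorem adjust_pos_spec : Claim_equal_adjust_pos := by
  intro exon_dict min_pos _ hpre
  unfold Spec_adjust_pos adjust_pos adjust_pos_alt
  exact congrArg (fun st => (st.1.items, st.2.1.items, st.2.2.items))
    (pvFold_eq min_pos exon_dict PySem.Dict.empty PySem.Dict.empty PySem.Dict.empty hpre
      (fun kv _ => ⟨PySem.Dict.contains_empty _, PySem.Dict.contains_empty _, PySem.Dict.contains_empty _⟩))
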